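-- pv_equiv track=rewrite | github.com/tvkpz/ctc-sequence-model-ocr | python/create_tfrecords.py | padLabels
-- ===== SOURCE A (Python) =====
-- alphabet = u''
--
-- def text_to_label(text):
--     if text=='<nul>':
--         return len(alphabet)
--     else:
--         return alphabet.find(text)
--
-- def padLabels(label, max_length=200):
--     nul_id = text_to_label('<nul>')
--     padded = [nul_id]
--     for l in label:
--         padded.append(l)
--         padded.append(nul_id)
--     assert len(padded)<=max_length, "max length for padding is too small"
--     size = 0
--     while len(padded) < max_length:
--         padded.append(nul_id)
--         size+=1
--     return padded
-- ===== SOURCE B (Python) =====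
-- def padLabels(label, max_length=200):
--     # nul label id: alphabet is empty, so text_to_label('<nul>') == 0
--     n = 2 * len(label) + 1
--     assert n <= max_length, "max length for padding is too small"
--     padded = [0] * max_length
--     padded[1:n:2] = label
--     return padded
-- ===== Notes on version B (the rewrite author's own statement) =====
-- stated objective: simpler
-- what changed: Replaces the interleave-append loop plus while-padding loop with one preallocated [0]*max_length buffer and a single extended-slice scatter write at the odd positions.
import Mathlib
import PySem

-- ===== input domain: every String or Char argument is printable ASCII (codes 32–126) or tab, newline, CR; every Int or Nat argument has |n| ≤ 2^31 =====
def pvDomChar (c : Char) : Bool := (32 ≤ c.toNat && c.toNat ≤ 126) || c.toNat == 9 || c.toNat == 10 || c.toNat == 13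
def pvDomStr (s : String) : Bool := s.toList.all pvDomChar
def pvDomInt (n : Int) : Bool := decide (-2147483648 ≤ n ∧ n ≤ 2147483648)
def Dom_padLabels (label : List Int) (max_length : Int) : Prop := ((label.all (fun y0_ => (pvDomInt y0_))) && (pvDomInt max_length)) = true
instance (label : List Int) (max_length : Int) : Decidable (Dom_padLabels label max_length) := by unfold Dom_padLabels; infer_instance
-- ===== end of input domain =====

-- B replaces A's interleave-append loop + while-padding loop by a preallocated
-- zero buffer of length max_length with the labels scattered into the odd positions (objective: simpler).

-- ===== PORT A =====
-- alphabet = u''; text_to_label('<nul>') = len(alphabet) = 0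
def padLabels_textToLabel (text : String) : Int :=
  if text = "<nul>" then 0 else PySem.Str.find "" text

-- the while loop: append nul_id until len(padded) == max_length (size counter unused)
def padLabels_padTo (padded : List Int) (max_length : Int) (nul_id : Int) : List Int :=
  if (padded.length : Int) < max_length then
    padLabels_padTo (padded ++ [nul_id]) max_length nul_id
  else padded
termination_by (max_length - padded.length).toNat
decreasing_by simp only [List.length_append, List.length_singleton, Int.lt_iff_add_one_le] at *; push_cast at *; omega

def padLabels (label : List Int) (max_length : Int) : List Int :=
  let nul_id := padLabels_textToLabel "<nul>"
  let padded := label.foldl (fun acc l => (acc ++ [l]) ++ [nul_id]) [nul_id]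
  -- assert len(padded) <= max_length : Pre_padLabels excludes the failing inputs
  padLabels_padTo padded max_length nul_id

-- ===== PORT B =====
-- padded[1:n:2] = label : write label into the odd positions of the zero buffer
def padLabels_scatterOdd : List Int → List Int → List Int
  | ps, [] => ps
  | p0 :: _ :: rest, l :: ls => p0 :: l :: padLabels_scatterOdd rest ls
  | ps, _ => ps  -- buffer exhausted (unreachable under the assert)

def padLabels_alt (label : List Int) (max_length : Int) : List Int :=
  -- n = 2*len(label)+1; assert n <= max_length (excluded by Pre_padLabels)
  let padded := List.replicate max_length.toNat 0
  padLabels_scatterOdd padded label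

-- ===== PRECONDITION & SPEC =====
-- Pre_ excludes exactly the inputs where A's (and B's) assert raises AssertionError.
def Pre_padLabels (label : List Int) (max_length : Int) : Prop :=
  2 * (label.length : Int) + 1 ≤ max_length
instance (label : List Int) (max_length : Int) : Decidable (Pre_padLabels label max_length) := by
  unfold Pre_padLabels; infer_instance

def pvWitness_padLabels : List Int × Int := ([3, 4], 7)

def Spec_padLabels (label : List Int) (max_length : Int) (out : List Int) : Prop := out = padLabels_alt label max_length
instance (label : List Int) (max_length : Int) (out : List Int) : Decidable (Spec_padLabels label max_length out) := by unfold Spec_padLabels; infer_instance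

-- ===== CLAIM (what is proved, stated in full; the proofs are below) =====
def Claim_equal_padLabels : Prop := ∀ (label : List Int) (max_length : Int), Dom_padLabels label max_length → Pre_padLabels label max_length → Spec_padLabels label max_length (padLabels label max_length)

-- ===== LEMMAS AND PROOFS =====

lemma padLabels_padTo_eq (padded : List Int) (m : Int) :
    padLabels_padTo padded m 0 = padded ++ List.replicate (m - padded.length).toNat 0 := by
  generalize h : (m - padded.length).toNat = k
  induction k generalizing padded with
  | zero =>
    rw [padLabels_padTo]
    have : ¬ ((padded.length : Int) < m) := by omega
    simp [this]
  | succ k ih =>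
    rw [padLabels_padTo]
    have hlt : (padded.length : Int) < m := by omega
    have hk : (m - ((padded ++ [0]).length : Int)).toNat = k := by
      simp only [List.length_append, List.length_singleton]; push_cast; omega
    simp only [hlt, if_pos, ih _ hk]
    rw [List.replicate_succ, List.append_assoc, List.singleton_append]

lemma padLabels_scatterOdd_eq (label : List Int) (r : Nat) :
    padLabels_scatterOdd (List.replicate (2 * label.length + 1 + r) 0) label
      = 0 :: label.flatMap (fun l => [l, 0]) ++ List.replicate r 0 := by
  induction label generalizing r with
  | nil =>
    have : 1 + r = r + 1 := by omega
    simp [padLabels_scatterOdd, this, List.replicate_succ]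
  | cons l ls ih =>
    have : 2 * (l :: ls).length + 1 + r = (2 * ls.length + 1 + r) + 1 + 1 := by
      simp; ring
    rw [this, List.replicate_succ, List.replicate_succ, padLabels_scatterOdd, ih]
    simp

-- ===== VERDICT (by name: the statement is the Claim_ definition above) =====
theorem padLabels_spec : Claim_equal_padLabels := by
  intro label m _hdom hpre
  unfold Spec_padLabels padLabels padLabels_alt padLabels_textToLabel
  simp only [if_true]
  rw [show (fun (acc : List Int) l => acc ++ [l] ++ [(0:Int)]) = (fun acc l => acc ++ [l, 0]) by
        funext acc l; simp,
      PySem.List.foldl_append_eq_flatMap]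
  have hlen : ((([0] ++ label.flatMap fun l => [l, 0]) : List Int).length : Int)
      = 2 * label.length + 1 := by
    simp [List.length_flatMap]; ring
  rw [padLabels_padTo_eq, hlen]
  have hr : m.toNat = 2 * label.length + 1 + (m - (2 * (label.length : Int) + 1)).toNat := by
    unfold Pre_padLabels at hpre; omega
  rw [hr, padLabels_scatterOdd_eq]
  simp
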